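-- pv_equiv track=rewrite | github.com/daniel-reich/ubiquitous-fiesta | kS8tfJD2ggohQbWx7_19.py | last_name_lensort
-- ===== SOURCE A (Python) =====
-- def last_name_lensort(names):
--   names_list = []
--   for n in names:
--     names_list.append(n.split(" "))
--   names_sorted = sorted(names_list, key=lambda x:x[1])
--   names_sorted = sorted(names_sorted, key=lambda x:len(x[1]))
--   names_final = []
--   for j in range(0, len(names_sorted)):
--     names_final.append(" ".join(names_sorted[j]))
--   return names_final
-- ===== SOURCE B (Python) =====
-- def last_name_lensort(names):
--   pairs = [(len(n.split(" ")[1]), n) for n in names]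
--   buckets = {}
--   for k, n in pairs:
--     buckets[k] = buckets.get(k, []) + [n]
--   out = []
--   for k in sorted(buckets):
--     out.extend(sorted(buckets[k], key=lambda s: s.split(" ")[1]))
--   return out
-- ===== Notes on version B (the rewrite author's own statement) =====
-- stated objective: alternative
-- what changed: Replaces A's two stable full-list sorts (by last name, then by its length) with a dict grouping names by last-name length, emitted bucket by bucket in ascending key order with each bucket sorted alphabetically by last name.
import Mathlib
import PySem

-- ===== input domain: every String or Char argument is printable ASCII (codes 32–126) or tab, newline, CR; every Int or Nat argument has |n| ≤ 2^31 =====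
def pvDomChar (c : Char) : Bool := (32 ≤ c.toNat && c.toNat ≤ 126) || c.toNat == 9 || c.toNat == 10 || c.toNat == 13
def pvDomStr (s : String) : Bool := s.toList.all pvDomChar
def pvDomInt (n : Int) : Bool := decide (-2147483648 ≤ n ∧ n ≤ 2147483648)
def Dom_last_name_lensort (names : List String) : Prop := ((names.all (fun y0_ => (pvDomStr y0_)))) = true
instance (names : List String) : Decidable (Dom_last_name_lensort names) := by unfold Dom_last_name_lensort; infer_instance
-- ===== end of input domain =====

-- B groups the names into a dict keyed by last-name length, then emits each length bucket
-- (in ascending key order) sorted alphabetically by last name, instead of A's two stable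
-- full-list sorts; objective: alternative decomposition (no speed claim).

-- ===== PORT A =====
def last_name_lensort (names : List String) : List String :=
  let names_list := names.foldl (fun acc n => acc ++ [(PySem.Str.split? n " ").getD []]) []
  let names_sorted := PySem.List.sorted names_list (fun x => PySem.List.pyGetD x 1 "") false
  let names_sorted2 := PySem.List.sorted names_sorted
      (fun x => PySem.Str.len (PySem.List.pyGetD x 1 "")) false
  (PySem.List.pyRange 0 (PySem.List.len names_sorted2)).foldl
    (fun acc j => acc ++ [PySem.Str.join " " (PySem.List.pyGetD names_sorted2 j [])]) []

-- ===== PORT B =====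
def last_name_lensort_alt (names : List String) : List String :=
  let pairs := names.map (fun n =>
      (PySem.Str.len (PySem.List.pyGetD ((PySem.Str.split? n " ").getD []) 1 ""), n))
  let buckets := pairs.foldl (fun d p => d.modify p.1 [] (fun b => b ++ [p.2])) PySem.Dict.empty
  (PySem.List.sorted buckets.keys (fun v => v) false).foldl
    (fun out v => out ++ PySem.List.sorted (buckets.getD v [])
        (fun s => PySem.List.pyGetD ((PySem.Str.split? s " ").getD []) 1 "") false) []

-- ===== PRECONDITION & SPEC =====
-- Pre_ excludes names without a second space-separated token, on which A raises IndexError.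
def Pre_last_name_lensort (names : List String) : Prop :=
  ∀ n ∈ names, 2 ≤ ((PySem.Str.split? n " ").getD []).length
instance (names : List String) : Decidable (Pre_last_name_lensort names) := by
  unfold Pre_last_name_lensort; infer_instance
def pvWitness_last_name_lensort : List String := ["John Smith", "Al Bo", "Cy Smith"]
def Spec_last_name_lensort (names : List String) (out : List String) : Prop :=
  out = last_name_lensort_alt names
instance (names : List String) (out : List String) : Decidable (Spec_last_name_lensort names out) := by
  unfold Spec_last_name_lensort; infer_instance

-- ===== CLAIM (what is proved, stated in full; the proofs are below) =====
def Claim_equal_last_name_lensort : Prop := ∀ (names : List String), Dom_last_name_lensort names → Pre_last_name_lensort names → Spec_last_name_lensort names (last_name_lensort names)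

-- ===== LEMMAS AND PROOFS =====

lemma pv_insertBy_append_not {α : Type} (bef : α → α → Bool) (x : α) (as bs : List α)
    (h : ∀ a ∈ as, bef x a = false) :
    PySem.List.insertBy bef x (as ++ bs) = as ++ PySem.List.insertBy bef x bs := by
  induction as with
  | nil => rfl
  | cons a as ih =>
    have ha := h a (by simp)
    simp [PySem.List.insertBy, ha, ih (fun a ha' => h a (by simp [ha']))]

lemma pv_insertBy_all {α : Type} (bef : α → α → Bool) (x : α) (bs : List α)
    (h : ∀ b ∈ bs, bef x b = true) :
    PySem.List.insertBy bef x bs = x :: bs := by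
  cases bs with
  | nil => rfl
  | cons b bs => simp [PySem.List.insertBy, h b (by simp)]

lemma pv_sorted_append_singleton {α κ : Type} [LinearOrder κ] (l : List α) (x : α) (key : α → κ) :
    PySem.List.sorted (l ++ [x]) key false
      = PySem.List.insertBy (fun a b => decide (key a < key b)) x (PySem.List.sorted l key false) := by
  rw [PySem.List.sorted_eq_foldl_insertBy, PySem.List.sorted_eq_foldl_insertBy, List.foldl_append]
  rfl

lemma pv_insertBy_flatMap {α κ : Type} [LinearOrder κ] [BEq κ] [LawfulBEq κ]
    (key : α → κ) (x : α) (vs : List κ) (B : κ → List α)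
    (hB : ∀ v ∈ vs, ∀ a ∈ B v, key a = v)
    (hvs : vs.Pairwise (· < ·)) (hx : key x ∈ vs) :
    PySem.List.insertBy (fun a b => decide (key a < key b)) x (vs.flatMap B)
      = vs.flatMap (fun v => B v ++ if key x == v then [x] else []) := by
  induction vs with
  | nil => simp at hx
  | cons v vs ih =>
    rw [List.flatMap_cons, List.flatMap_cons]
    have hpw := (List.pairwise_cons.mp hvs)
    by_cases hkv : key x = v
    · have h1 : ∀ a ∈ B v, (fun a b => decide (key a < key b)) x a = false := by
        intro a ha
        have := hB v (by simp) a ha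
        simp [this, hkv]
      rw [pv_insertBy_append_not _ _ _ _ h1]
      have h2 : ∀ b ∈ vs.flatMap B, (fun a b => decide (key a < key b)) x b = true := by
        intro b hb
        obtain ⟨v', hv', hbv'⟩ := List.mem_flatMap.mp hb
        have hkb := hB v' (by simp [hv']) b hbv'
        have : v < v' := hpw.1 v' hv'
        simp only [hkb, hkv, decide_eq_true_eq]
        exact this
      rw [pv_insertBy_all _ _ _ h2]
      have h3 : vs.flatMap (fun v' => B v' ++ if key x == v' then [x] else []) = vs.flatMap B := by
        simp only [List.flatMap]
        congr 1
        apply List.map_congr_left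
        intro v' hv'
        have hlt : v < v' := hpw.1 v' hv'
        have : (key x == v') = false := by
          simp only [beq_eq_false_iff_ne, ne_eq, hkv]
          exact ne_of_lt hlt
        simp [this]
      rw [h3]
      have : (key x == v) = true := by simp [hkv]
      simp [this]
    · have hx' : key x ∈ vs := by
        cases List.mem_cons.mp hx with
        | inl h => exact absurd h hkv
        | inr h => exact h
      have h1 : ∀ a ∈ B v, (fun a b => decide (key a < key b)) x a = false := by
        intro a ha
        have hka := hB v (by simp) a ha
        have : v < key x := hpw.1 _ hx'
        simp [hka]
        exact le_of_lt this
      rw [pv_insertBy_append_not _ _ _ _ h1]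
      rw [ih (fun v' hv' => hB v' (by simp [hv'])) hpw.2 hx']
      have : (key x == v) = false := by simp [hkv]
      simp [this]

lemma pv_sorted_eq_flatMap {α κ : Type} [LinearOrder κ] [BEq κ] [LawfulBEq κ]
    (l : List α) (key : α → κ) (vs : List κ)
    (hvs : vs.Pairwise (· < ·)) (hcov : ∀ x ∈ l, key x ∈ vs) :
    PySem.List.sorted l key false = vs.flatMap (fun v => l.filter (fun x => key x == v)) := by
  induction l using List.reverseRecOn with
  | nil =>
    have : PySem.List.sorted ([] : List α) key false = [] := rfl
    simp [this]
  | append_singleton l x ih =>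
    rw [pv_sorted_append_singleton,
        ih (fun y hy => hcov y (by simp [hy]))]
    rw [pv_insertBy_flatMap key x vs (fun v => l.filter (fun y => key y == v))
        (fun v hv a ha => by simpa using (List.mem_filter.mp ha).2)
        hvs (hcov x (by simp))]
    simp [List.filter_append, List.filter_cons, beq_iff_eq]

lemma pv_insertBy_filter {α κ : Type} [LinearOrder κ] (key : α → κ) (p : α → Bool) (x : α)
    (ys : List α) (hs : ys.Pairwise (fun a b => key a ≤ key b)) :
    (PySem.List.insertBy (fun a b => decide (key a < key b)) x ys).filter p
      = if p x then PySem.List.insertBy (fun a b => decide (key a < key b)) x (ys.filter p)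
        else ys.filter p := by
  induction ys with
  | nil =>
    simp only [PySem.List.insertBy, List.filter_nil]
    by_cases hp : p x <;> simp [hp]
  | cons y ys ih =>
    have hpw := List.pairwise_cons.mp hs
    by_cases hb : key x < key y
    · have hbt : decide (key x < key y) = true := by simp [hb]
      simp only [PySem.List.insertBy, hbt, if_true]
      by_cases hp : p x
      · by_cases hpy : p y
        · simp [hp, hpy, PySem.List.insertBy, hbt]
        · simp only [List.filter_cons, hp, hpy, if_true, if_false, Bool.false_eq_true]
          rw [pv_insertBy_all _ _ _ (by
            intro b hb'
            have hmem : b ∈ ys := List.mem_of_mem_filter hb'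
            have : key y ≤ key b := hpw.1 b hmem
            simp only [decide_eq_true_eq]
            exact lt_of_lt_of_le hb this)]
      · simp [hp]
    · have hbf : decide (key x < key y) = false := by simp [hb]
      simp only [PySem.List.insertBy, hbf, Bool.false_eq_true, if_false]
      by_cases hpy : p y
      · simp only [List.filter_cons, hpy, if_true]
        rw [ih hpw.2]
        by_cases hp : p x
        · simp [hp, PySem.List.insertBy, hbf]
        · simp [hp]
      · simp only [List.filter_cons, hpy, Bool.false_eq_true, if_false]
        rw [ih hpw.2]

lemma pv_sorted_filter {α κ : Type} [LinearOrder κ] (l : List α) (key : α → κ) (p : α → Bool) :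
    (PySem.List.sorted l key false).filter p = PySem.List.sorted (l.filter p) key false := by
  induction l using List.reverseRecOn with
  | nil => rfl
  | append_singleton l x ih =>
    rw [pv_sorted_append_singleton,
        pv_insertBy_filter key p x _ (PySem.List.sorted_pairwise l key), ih]
    by_cases hp : p x
    · rw [List.filter_append]
      simp only [List.filter_cons, hp, if_true, List.filter_nil]
      rw [pv_sorted_append_singleton]
    · rw [List.filter_append]
      simp [hp]

lemma pv_go_ne_nil (sep : List Char) :
    ∀ (fuel : Nat) (l cur : List Char) (acc : List (List Char)),
      PySem.Chars.splitOn.go sep fuel l cur acc ≠ [] := by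
  intro fuel
  induction fuel with
  | zero => intro l cur acc; rw [PySem.Chars.splitOn.go.eq_def]; simp
  | succ fuel ih =>
    intro l cur acc
    rw [PySem.Chars.splitOn.go.eq_def]
    cases l with
    | nil => simp
    | cons c rest =>
      simp only []
      split_ifs <;> exact ih _ _ _

lemma pv_go_acc (sep : List Char) :
    ∀ (fuel : Nat) (l cur : List Char) (acc : List (List Char)),
      PySem.Chars.splitOn.go sep fuel l cur acc
        = acc.reverse ++ PySem.Chars.splitOn.go sep fuel l cur [] := by
  intro fuel
  induction fuel with
  | zero => intro l cur acc; rw [PySem.Chars.splitOn.go.eq_def, PySem.Chars.splitOn.go.eq_def]; simp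
  | succ fuel ih =>
    intro l cur acc
    rw [PySem.Chars.splitOn.go.eq_def]
    cases l with
    | nil => rw [PySem.Chars.splitOn.go.eq_def]; simp
    | cons c rest =>
      simp only []
      split_ifs with h
      · rw [ih _ _ (cur.reverse :: acc)]
        conv_rhs => rw [PySem.Chars.splitOn.go.eq_def]
        simp only [h, if_true]
        rw [ih _ _ [cur.reverse]]
        simp
      · rw [ih rest (c :: cur) acc]
        conv_rhs => rw [PySem.Chars.splitOn.go.eq_def]
        simp only []
        rw [if_neg h]

lemma pv_join_go (sep : List Char) (hsep : sep ≠ []) :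
    ∀ (fuel : Nat) (l cur : List Char), l.length < fuel →
      PySem.Chars.join sep (PySem.Chars.splitOn.go sep fuel l cur []) = cur.reverse ++ l := by
  intro fuel
  induction fuel with
  | zero => intro l cur h; omega
  | succ fuel ih =>
    intro l cur h
    rw [PySem.Chars.splitOn.go.eq_def]
    cases l with
    | nil => simp [PySem.Chars.join_singleton]
    | cons c rest =>
      simp only []
      split_ifs with hp
      · have hpre : sep <+: (c :: rest) := by
          exact List.isPrefixOf_iff_prefix.mp hp
        have hlen : sep.length ≤ (c :: rest).length := hpre.length_le
        have hslen : 1 ≤ sep.length := by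
          cases sep with
          | nil => exact absurd rfl hsep
          | cons _ _ => simp
        rw [pv_go_acc]
        have hfuel : (List.drop sep.length (c :: rest)).length < fuel := by
          simp only [List.length_drop]
          simp only [List.length_cons] at h ⊢
          omega
        have hne := pv_go_ne_nil sep fuel (List.drop sep.length (c :: rest)) [] []
        obtain ⟨p, ps, hps⟩ : ∃ p ps, PySem.Chars.splitOn.go sep fuel (List.drop sep.length (c :: rest)) [] [] = p :: ps := by
          cases hgo : PySem.Chars.splitOn.go sep fuel (List.drop sep.length (c :: rest)) [] [] with
          | nil => exact absurd hgo hne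
          | cons p ps => exact ⟨p, ps, rfl⟩
        have hjoin := ih (List.drop sep.length (c :: rest)) [] hfuel
        rw [hps] at hjoin ⊢
        simp only [List.reverse_cons, List.reverse_nil, List.nil_append, List.singleton_append]
        rw [PySem.Chars.join_cons_cons]
        rw [hjoin]
        simp only [List.reverse_nil, List.nil_append]
        obtain ⟨t, ht⟩ := hpre
        rw [← ht]
        simp
      · have := ih rest (c :: cur) (by simpa using Nat.lt_of_succ_lt_succ (by simpa using h))
        rw [this]
        simp

lemma pv_join_splitOn (s sep : List Char) (hsep : sep ≠ []) :
    PySem.Chars.join sep (PySem.Chars.splitOn s sep) = s := by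
  have : PySem.Chars.splitOn s sep = PySem.Chars.splitOn.go sep (s.length + 1) s [] [] := rfl
  rw [this, pv_join_go sep hsep (s.length + 1) s [] (by omega)]
  simp

lemma pv_join_split (n : String) :
    PySem.Str.join " " ((PySem.Str.split? n " ").getD []) = n := by
  have hmap := PySem.Str.split?_map n " "
  have hsep : (" " : String).toList = [' '] := rfl
  rw [hsep] at hmap
  simp only [PySem.Chars.split?, List.isEmpty_cons] at hmap
  cases hsplit : PySem.Str.split? n " " with
  | none => rw [hsplit] at hmap; simp at hmap
  | some parts =>
    rw [hsplit] at hmap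
    simp only [Option.map_some] at hmap
    have hparts : List.map String.toList parts = PySem.Chars.splitOn n.toList [' '] :=
      Option.some.inj hmap
    simp only [Option.getD_some]
    have : (PySem.Str.join " " parts).toList = n.toList := by
      rw [PySem.Str.toList_join, hsep, hparts, pv_join_splitOn _ _ (by simp)]
    exact String.toList_inj.mp this


lemma pv_insertBy_map {α β : Type} (bef : β → β → Bool) (f : α → β) (x : α) (l : List α) :
    PySem.List.insertBy bef (f x) (l.map f)
      = (PySem.List.insertBy (fun a b => bef (f a) (f b)) x l).map f := by
  induction l with
  | nil => rfl
  | cons a l ih =>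
    by_cases h : bef (f x) (f a) = true
    · simp [PySem.List.insertBy, h]
    · simp only [Bool.not_eq_true] at h
      simp [PySem.List.insertBy, h, ih]

lemma pv_sorted_map {α β κ : Type} [LinearOrder κ] (m : List α) (f : α → β) (key : β → κ) :
    PySem.List.sorted (m.map f) key false
      = (PySem.List.sorted m (fun a => key (f a)) false).map f := by
  induction m using List.reverseRecOn with
  | nil => rfl
  | append_singleton m x ih =>
    rw [List.map_append, List.map_cons, List.map_nil, pv_sorted_append_singleton,
        pv_sorted_append_singleton, ih, pv_insertBy_map]

lemma pv_AB (names : List String) :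
    List.map (fun y => PySem.Str.join " " y)
      (PySem.List.sorted
        (PySem.List.sorted (names.map (fun x => (PySem.Str.split? x " ").getD []))
          (fun x => PySem.List.pyGetD x 1 "") false)
        (fun x => PySem.Str.len (PySem.List.pyGetD x 1 "")) false)
    = List.flatMap
        (fun v => PySem.List.sorted
            (names.filter (fun n =>
              PySem.Str.len (PySem.List.pyGetD ((PySem.Str.split? n " ").getD []) 1 "") == v))
            (fun s => PySem.List.pyGetD ((PySem.Str.split? s " ").getD []) 1 "") false)
        (PySem.List.sorted
          (PySem.Set.ofList (names.map (fun n =>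
            PySem.Str.len (PySem.List.pyGetD ((PySem.Str.split? n " ").getD []) 1 ""))))
          (fun v => v) false) := by
  have hvs := PySem.List.sorted_ofList_pairwise_lt (names.map (fun n =>
    PySem.Str.len (PySem.List.pyGetD ((PySem.Str.split? n " ").getD []) 1 "")))
  have hcov : ∀ x ∈ PySem.List.sorted (names.map (fun x => (PySem.Str.split? x " ").getD []))
      (fun x => PySem.List.pyGetD x 1 "") false,
      (fun x => PySem.Str.len (PySem.List.pyGetD x 1 "")) x ∈
        PySem.List.sorted
          (PySem.Set.ofList (names.map (fun n =>
            PySem.Str.len (PySem.List.pyGetD ((PySem.Str.split? n " ").getD []) 1 ""))))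
          (fun v => v) false := by
    intro x hx
    rw [PySem.List.mem_sorted] at hx ⊢
    rw [PySem.Set.mem_ofList]
    obtain ⟨n, hn, rfl⟩ := List.mem_map.mp hx
    exact List.mem_map.mpr ⟨n, hn, rfl⟩
  rw [pv_sorted_eq_flatMap _ _ _ hvs hcov]
  rw [List.map_flatMap]
  have hbucket : ∀ v : Int,
      List.map (fun y => PySem.Str.join " " y)
        ((PySem.List.sorted (names.map (fun x => (PySem.Str.split? x " ").getD []))
            (fun x => PySem.List.pyGetD x 1 "") false).filter
          (fun x => PySem.Str.len (PySem.List.pyGetD x 1 "") == v))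
      = PySem.List.sorted
          (names.filter (fun n =>
            PySem.Str.len (PySem.List.pyGetD ((PySem.Str.split? n " ").getD []) 1 "") == v))
          (fun s => PySem.List.pyGetD ((PySem.Str.split? s " ").getD []) 1 "") false := by
    intro v
    rw [pv_sorted_filter, List.filter_map, pv_sorted_map]
    rw [List.map_map]
    have hid : ∀ a ∈ PySem.List.sorted
        (names.filter ((fun x => PySem.Str.len (PySem.List.pyGetD x 1 "") == v) ∘
          (fun x => (PySem.Str.split? x " ").getD [])))
        (fun a => PySem.List.pyGetD ((PySem.Str.split? a " ").getD []) 1 "") false,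
        ((fun y => PySem.Str.join " " y) ∘ (fun x => (PySem.Str.split? x " ").getD [])) a = id a :=
      fun a _ => pv_join_split a
    rw [List.map_congr_left hid, List.map_id]
    rfl
  simp only [hbucket]

theorem last_name_lensort_spec : Claim_equal_last_name_lensort := by
  intro names _ _
  unfold Spec_last_name_lensort last_name_lensort last_name_lensort_alt
  simp only [PySem.List.foldl_append_singleton_eq_map, List.nil_append,
    PySem.Dict.getD_foldl_modify_append, PySem.Dict.keys_foldl_modify_key, PySem.Dict.keys_empty,
    PySem.Dict.getD_empty, PySem.List.foldl_append_eq_flatMap, List.map_map, List.filter_map]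
  have hmap : ∀ (xs : List (List String)),
      List.map (fun x => PySem.Str.join " " (PySem.List.pyGetD xs x []))
        (PySem.List.pyRange 0 (PySem.List.len xs))
        = List.map (fun y => PySem.Str.join " " y) xs := by
    intro xs
    conv_rhs => rw [← PySem.List.map_pyGetD_pyRange_zero xs ([] : List String)]
    rw [List.map_map]
    rfl
  rw [hmap]
  have hupd : ∀ L : List Int, PySem.Set.update ([] : PySem.Set Int) L = PySem.Set.ofList L :=
    fun L => rfl
  simp only [Function.comp_def, hupd, List.map_id']
  exact pv_AB names
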